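-- pv_equiv track=rewrite | github.com/bitsofbits/advent_of_code | 2017/day_24/pythonimp/implementation.py | assemble_long
-- ===== SOURCE A (Python) =====
-- def assemble_long(parts):
--     n = len(parts)
--     stack = []
--     for i, (a, b) in enumerate(parts):
--         a, b = parts[i]
--         if a == 0 or b == 0:
--             available = frozenset(j for j in range(n) if j != i)
--             if a == 0:
--                 stack.append((b, available, b))
--             if b == 0:
--                 stack.append((a, available, a))
--
--     best = (1, max(s for (_, _, s) in stack))
--     while stack:
--         b, available, s = stack.pop()
--         if (n - len(available), s) > best:
--             best = (n - len(available), s)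
--         for next_i in available:
--             p0, p1 = parts[next_i]
--             next_available = None
--             for next_a, next_b in [(p0, p1), (p1, p0)]:
--                 if next_a != b:
--                     continue
--                 if next_available is None:
--                     next_available = available - {next_i}
--                 next_s = s + next_a + next_b
--                 stack.append((next_b, next_available, next_s))
--     _, s = best
--     return s
-- ===== SOURCE B (Python) =====
-- def assemble_long(parts):
--     # Recursive backtracking over the list of remaining parts (no index sets, no
--     # explicit stack): best_from returns the lexicographic max of (length, strength)
--     # over every bridge extending the current one.
--     def best_from(port, remaining, length, strength, best):
--         if (length, strength) > best:
--             best = (length, strength)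
--         for i in range(len(remaining)):
--             a, b = remaining[i]
--             rest = remaining[:i] + remaining[i + 1:]
--             if a == port:
--                 best = best_from(b, rest, length + 1, strength + a + b, best)
--             if b == port and a != b:
--                 best = best_from(a, rest, length + 1, strength + a + b, best)
--         return best
--     return best_from(0, parts, 0, 0, (0, 0))[1]
-- ===== Notes on version B (the rewrite author's own statement) =====
-- stated objective: alternative
-- what changed: Replaced A's explicit work-stack iteration over (port, frozenset-of-available-indices, strength) states (seeded by a separate enumeration pass and a max() over seed strengths) with a recursive backtracking helper best_from(port, remaining, length, strength, best) that threads the lexicographic (length, strength) maximum through the recursion and removes parts from a plain remaining list.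
import Mathlib
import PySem

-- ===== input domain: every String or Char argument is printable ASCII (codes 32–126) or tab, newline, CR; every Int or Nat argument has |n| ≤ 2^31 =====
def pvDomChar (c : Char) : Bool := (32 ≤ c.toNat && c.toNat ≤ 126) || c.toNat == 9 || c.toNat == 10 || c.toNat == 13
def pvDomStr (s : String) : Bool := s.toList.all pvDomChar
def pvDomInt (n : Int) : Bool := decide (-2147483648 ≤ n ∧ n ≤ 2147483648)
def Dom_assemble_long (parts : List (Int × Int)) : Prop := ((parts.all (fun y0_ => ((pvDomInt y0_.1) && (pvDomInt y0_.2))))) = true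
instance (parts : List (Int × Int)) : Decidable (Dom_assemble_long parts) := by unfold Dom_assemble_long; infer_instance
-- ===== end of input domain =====

-- B is an 'alternative': recursive backtracking over the list of remaining parts, instead of
-- A's explicit work stack of (port, frozenset-of-available-indices, strength) states.

-- ===== PORT A =====
-- Python tuple comparison 'cand > best' on int pairs (lexicographic)
def pyLexGt (x y : Int × Int) : Bool := x.1 > y.1 || (x.1 == y.1 && x.2 > y.2)
-- 'if cand > best: best = cand'
def lmax (best cand : Int × Int) : Int × Int := if pyLexGt cand best then cand else best

-- body of 'for next_a, next_b in [(p0, p1), (p1, p0)]: …' for ONE next_i, collecting the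
-- entries appended to the stack (next_available is the lazily-computed Option)
def stepA (parts : List (Int × Int)) (b : Int) (available : PySem.Set Int) (s : Int)
    (next_i : Int) : List (Int × PySem.Set Int × Int) :=
  let p := PySem.List.pyGetD parts next_i (0, 0)   -- parts[next_i]; next_i is always a valid index
  ([(p.1, p.2), (p.2, p.1)].foldl
    (fun (st : Option (PySem.Set Int) × List (Int × PySem.Set Int × Int)) ori =>
      if ori.1 ≠ b then st
      else
        let nav := st.1.getD (PySem.Set.diff available [next_i])
        (some nav, st.2 ++ [(ori.2, nav, s + ori.1 + ori.2)]))
    (none, [])).2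

-- 'for next_i in available: …' — everything one pop appends to the stack
def pushesA (parts : List (Int × Int)) (b : Int) (available : PySem.Set Int) (s : Int) :
    List (Int × PySem.Set Int × Int) :=
  available.foldl (fun acc next_i => acc ++ stepA parts b available s next_i) []

-- the seeding loop 'for i, (a, b) in enumerate(parts): …'
def seedsA (parts : List (Int × Int)) : List (Int × PySem.Set Int × Int) :=
  (PySem.List.enumerate parts).foldl (fun stack e =>
    let i := e.1
    let ab := PySem.List.pyGetD parts i (0, 0)      -- a, b = parts[i]
    if ab.1 = 0 ∨ ab.2 = 0 then
      let available : PySem.Set Int :=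
        PySem.Set.ofList ((PySem.List.pyRange 0 (parts.length : Int)).filter (fun j => j ≠ i))
      let stack := if ab.1 = 0 then stack ++ [(ab.2, available, ab.2)] else stack
      if ab.2 = 0 then stack ++ [(ab.1, available, ab.1)] else stack
    else stack) []

-- termination measure for the while loop: each stack entry weighs 3^k·k! (k = size of its
-- available set); a pop of weight w(k) appends ≤ 2k entries of weight w(k-1) < w(k)/2k
def wgt (k : Nat) : Nat := 3 ^ k * k.factorial
def wsum (st : List (Int × PySem.Set Int × Int)) : Nat := (st.map (fun e => wgt e.2.1.length)).sum

theorem wsum_append (x y : List (Int × PySem.Set Int × Int)) : wsum (x ++ y) = wsum x + wsum y := by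
  unfold wsum
  rw [List.map_append, List.sum_append]

theorem wsum_single (c : Int × PySem.Set Int × Int) : wsum [c] = wgt c.2.1.length := by
  unfold wsum
  rw [List.map_singleton, List.sum_singleton]


theorem stepA_eq (parts : List (Int × Int)) (b : Int) (av : PySem.Set Int) (s next_i : Int) :
    stepA parts b av s next_i =
      ((if (PySem.List.pyGetD parts next_i (0, 0)).1 = b then
          [((PySem.List.pyGetD parts next_i (0, 0)).2, PySem.Set.diff av [next_i],
            s + (PySem.List.pyGetD parts next_i (0, 0)).1 + (PySem.List.pyGetD parts next_i (0, 0)).2)]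
        else []) ++
       (if (PySem.List.pyGetD parts next_i (0, 0)).2 = b then
          [((PySem.List.pyGetD parts next_i (0, 0)).1, PySem.Set.diff av [next_i],
            s + (PySem.List.pyGetD parts next_i (0, 0)).2 + (PySem.List.pyGetD parts next_i (0, 0)).1)]
        else [])) := by
  unfold stepA
  simp only [List.foldl]
  by_cases h1 : (PySem.List.pyGetD parts next_i (0, 0)).1 = b
  · by_cases h2 : (PySem.List.pyGetD parts next_i (0, 0)).2 = b
    · rw [if_neg (fun hc => hc h2), if_neg (fun hc => hc h1), if_pos h1, if_pos h2]
      rfl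
    · rw [if_pos h2, if_neg (fun hc => hc h1), if_pos h1, if_neg h2]
      rfl
  · by_cases h2 : (PySem.List.pyGetD parts next_i (0, 0)).2 = b
    · rw [if_neg (fun hc => hc h2), if_pos h1, if_neg h1, if_pos h2]
      rfl
    · rw [if_pos h2, if_pos h1, if_neg h1, if_neg h2]
      rfl

theorem wgt_pos (k : Nat) : 0 < wgt k := by
  unfold wgt
  exact Nat.mul_pos (Nat.pos_of_neZero _) k.factorial_pos

theorem wgt_mono {j k : Nat} (h : j ≤ k) : wgt j ≤ wgt k := by
  unfold wgt
  exact Nat.mul_le_mul (Nat.pow_le_pow_right (by norm_num) h) (Nat.factorial_le h)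

theorem diff_length_lt {av : PySem.Set Int} {i : Int} (h : i ∈ av) :
    (PySem.Set.diff av [i]).length < av.length := by
  unfold PySem.Set.diff
  rw [List.length_filter_lt_length_iff_exists]
  exact ⟨i, h, by simp [PySem.Set.contains]⟩

theorem wsum_stepA_le (parts : List (Int × Int)) (b : Int) (av : PySem.Set Int) (s next_i : Int)
    (h : next_i ∈ av) : wsum (stepA parts b av s next_i) ≤ 2 * wgt (av.length - 1) := by
  have hd : (PySem.Set.diff av [next_i]).length ≤ av.length - 1 :=
    Nat.le_sub_one_of_lt (diff_length_lt h)
  have hw := wgt_mono hd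
  rw [stepA_eq]
  split_ifs
  · rw [wsum_append, wsum_single, wsum_single, Nat.two_mul]
    exact Nat.add_le_add hw hw
  · rw [List.append_nil, wsum_single, Nat.two_mul]
    exact Nat.le_trans hw (Nat.le_add_right _ _)
  · rw [List.nil_append, wsum_single, Nat.two_mul]
    exact Nat.le_trans hw (Nat.le_add_right _ _)
  · exact Nat.zero_le _

theorem wsum_pushesA_lt (parts : List (Int × Int)) (b : Int) (av : PySem.Set Int) (s : Int) :
    wsum (pushesA parts b av s) < wgt av.length := by
  unfold pushesA
  rw [PySem.List.foldl_append_eq_flatMap]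
  have key : ∀ l : List Int, (∀ i ∈ l, i ∈ av) →
      wsum (l.flatMap (stepA parts b av s)) ≤ 2 * l.length * wgt (av.length - 1) := by
    intro l
    induction l with
    | nil => intro _; simp [wsum]
    | cons x t ih =>
        intro hmem
        rw [List.flatMap_cons, wsum_append]
        have h1 := wsum_stepA_le parts b av s x (hmem x (List.mem_cons_self))
        have h2 := ih (fun i hi => hmem i (List.mem_cons_of_mem x hi))
        rw [List.length_cons,
          show 2 * (t.length + 1) * wgt (av.length - 1) =
            2 * wgt (av.length - 1) + 2 * t.length * wgt (av.length - 1) from by ring]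
        exact Nat.add_le_add h1 h2
  rcases Nat.eq_zero_or_pos av.length with h0 | hpos
  · have : av = [] := List.length_eq_zero_iff.mp h0
    subst this
    simpa [wsum] using wgt_pos 0
  · have hk := key av (fun i hi => hi)
    rw [List.nil_append]
    have hlt : 2 * av.length * wgt (av.length - 1) < wgt av.length := by
      obtain ⟨m, hm⟩ : ∃ m, av.length = m + 1 := ⟨av.length - 1, by omega⟩
      rw [hm]
      have : wgt (m + 1) = 3 * (m + 1) * wgt m := by
        unfold wgt
        rw [Nat.factorial_succ, pow_succ]
        ring
      rw [this]
      exact Nat.mul_lt_mul_of_lt_of_le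
        (Nat.mul_lt_mul_of_lt_of_le (by omega) (Nat.le_refl _) (by omega)) (Nat.le_refl _)
        (wgt_pos m)
    exact Nat.lt_of_le_of_lt hk hlt

theorem whileA_dec (parts : List (Int × Int)) (stack : List (Int × PySem.Set Int × Int))
    (e : Int × PySem.Set Int × Int) (h : stack.getLast? = some e) :
    wsum (stack.dropLast ++ pushesA parts e.1 e.2.1 e.2.2) < wsum stack := by
  have hne : stack ≠ [] := by
    intro hnil
    rw [hnil] at h
    simp at h
  have hsplit : stack.dropLast ++ [stack.getLast hne] = stack := List.dropLast_concat_getLast hne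
  have hlast : stack.getLast hne = e := by
    have := List.getLast?_eq_some_getLast hne
    rw [h] at this
    exact (Option.some.injEq _ _).mp this.symm
  calc wsum (stack.dropLast ++ pushesA parts e.1 e.2.1 e.2.2)
      = wsum stack.dropLast + wsum (pushesA parts e.1 e.2.1 e.2.2) := wsum_append _ _
    _ < wsum stack.dropLast + wgt e.2.1.length := by
        have := wsum_pushesA_lt parts e.1 e.2.1 e.2.2
        omega
    _ = wsum stack := by
        conv_rhs => rw [← hsplit, wsum_append]
        simp [wsum, hlast]

-- 'while stack: …' — pop from the end; new entries are appended at the end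
def whileA (parts : List (Int × Int)) (stack : List (Int × PySem.Set Int × Int))
    (best : Int × Int) : Int × Int :=
  match h : stack.getLast? with
  | none => best
  | some e =>
      let b := e.1
      let available := e.2.1
      let s := e.2.2
      let rest := stack.dropLast
      let cand : Int × Int := ((parts.length : Int) - (available.length : Int), s)
      whileA parts (rest ++ pushesA parts b available s) (lmax best cand)
termination_by wsum stack
decreasing_by exact whileA_dec parts stack e h

def assemble_long (parts : List (Int × Int)) : Int :=
  let stack := seedsA parts
  -- best = (1, max(s for (_, _, s) in stack)); max() raises ValueError on an empty stack,
  -- which Pre_assemble_long excludes (the 'none' branch is unreachable under Pre_)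
  match PySem.List.max? (stack.map (fun e => e.2.2)) (fun x => x) with
  | none => 0
  | some m => (whileA parts stack (1, m)).2

theorem bLoop_dec_left (rem : List (Int × Int)) (i : Nat) (h : i < rem.length) :
    (rem.take i ++ rem.drop (i + 1)).length < rem.length := by
  rw [List.length_append, List.length_take_of_le (Nat.le_of_lt h), List.length_drop]
  omega

-- the recursion measure of bLoop, and its two decrease facts
theorem bLoop_measure_lt (A L i : Nat) (h : A < L) :
    A * (A + 1) + A < L * (L + 1) + (L - i) := by
  have h1 : A * (A + 1) + A < (A + 1) * (A + 2) := by
    rw [show (A + 1) * (A + 2) = A * (A + 1) + 2 * (A + 1) from by ring]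
    exact Nat.add_lt_add_left (by omega) _
  have h2 : (A + 1) * (A + 2) ≤ L * (L + 1) :=
    Nat.mul_le_mul h (Nat.add_le_add_right h 1)
  exact Nat.lt_of_lt_of_le (Nat.lt_of_lt_of_le h1 h2) (Nat.le_add_right _ _)

-- ===== PORT B =====
-- 'for i in range(len(remaining)): …' of best_from, with the entry update
-- 'if (length, strength) > best: best = …' fused into each call site as
-- 'best_from(…, best) = bLoop … (lmax best (length, strength)) 0'
def bLoop (port : Int) (remaining : List (Int × Int)) (length_ strength : Int)
    (best : Int × Int) (i : Nat) : Int × Int :=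
  if h : i < remaining.length then
    let a := (remaining[i]).1
    let b := (remaining[i]).2
    -- rest = remaining[:i] + remaining[i+1:]  (0 ≤ i < len: the slices are take/drop exactly)
    let rest := remaining.take i ++ remaining.drop (i + 1)
    let best1 := if a = port then
        bLoop b rest (length_ + 1) (strength + a + b)
          (lmax best (length_ + 1, strength + a + b)) 0
      else best
    let best2 := if b = port ∧ a ≠ b then
        bLoop a rest (length_ + 1) (strength + a + b)
          (lmax best1 (length_ + 1, strength + a + b)) 0
      else best1
    bLoop port remaining length_ strength best2 (i + 1)
  else best
termination_by remaining.length * (remaining.length + 1) + (remaining.length - i)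
decreasing_by
  · exact bLoop_measure_lt _ _ _ (bLoop_dec_left remaining i h)
  · exact bLoop_measure_lt _ _ _ (bLoop_dec_left remaining i h)
  · exact Nat.add_lt_add_left (Nat.sub_succ_lt_self _ _ h) _

def assemble_long_alt (parts : List (Int × Int)) : Int :=
  -- best_from(0, parts, 0, 0, (0, 0))[1]
  (bLoop 0 parts 0 0 (lmax (0, 0) (0, 0)) 0).2

-- ===== PRECONDITION & SPEC =====
-- Pre_ excludes exactly the inputs with no zero-ended part: there Python's max() over the empty
-- seed stack raises ValueError (A returns nothing).
def Pre_assemble_long (parts : List (Int × Int)) : Prop :=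
  (parts.any (fun p => p.1 == 0 || p.2 == 0)) = true
instance (parts : List (Int × Int)) : Decidable (Pre_assemble_long parts) := by
  unfold Pre_assemble_long; infer_instance

def pvWitness_assemble_long : (List (Int × Int)) := [(0, 2), (2, 3), (3, 0)]

def Spec_assemble_long (parts : List (Int × Int)) (out : Int) : Prop := out = assemble_long_alt parts
instance (parts : List (Int × Int)) (out : Int) : Decidable (Spec_assemble_long parts out) := by
  unfold Spec_assemble_long; infer_instance

-- ===== CLAIM (what is proved, stated in full; the proofs are below) =====
def Claim_equal_assemble_long : Prop := ∀ (parts : List (Int × Int)), Dom_assemble_long parts → Pre_assemble_long parts → Spec_assemble_long parts (assemble_long parts)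

-- ===== LEMMAS AND PROOFS =====

-- ----- the lexicographic order behind Python's tuple comparison, and lmax's algebra -----

def ple (x y : Int × Int) : Prop := x.1 < y.1 ∨ (x.1 = y.1 ∧ x.2 ≤ y.2)

theorem pyLexGt_iff (x y : Int × Int) :
    pyLexGt x y = true ↔ (y.1 < x.1 ∨ (y.1 = x.1 ∧ y.2 < x.2)) := by
  simp [pyLexGt]
  omega

theorem ple_refl (x : Int × Int) : ple x x := by simp [ple]

theorem ple_trans {x y z : Int × Int} (h1 : ple x y) (h2 : ple y z) : ple x z := by
  unfold ple at *
  omega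

theorem lmax_eq_right {x y : Int × Int} (h : ple x y) : lmax x y = y := by
  obtain ⟨x1, x2⟩ := x
  obtain ⟨y1, y2⟩ := y
  unfold ple at h
  simp only [lmax]
  by_cases hgt : pyLexGt (y1, y2) (x1, x2) = true
  · simp [hgt]
  · rw [if_neg hgt]
    rw [pyLexGt_iff] at hgt
    simp only at *
    have : x1 = y1 ∧ x2 = y2 := by omega
    simp [this.1, this.2]

theorem lmax_eq_left {x y : Int × Int} (h : ple y x) : lmax x y = x := by
  obtain ⟨x1, x2⟩ := x
  obtain ⟨y1, y2⟩ := y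
  unfold ple at h
  simp only [lmax]
  rw [if_neg]
  rw [pyLexGt_iff]
  simp only at *
  omega

theorem ple_lmax_left (x y : Int × Int) : ple x (lmax x y) := by
  obtain ⟨x1, x2⟩ := x
  obtain ⟨y1, y2⟩ := y
  simp only [lmax]
  split_ifs with h
  · rw [pyLexGt_iff] at h
    unfold ple
    simp only at *
    omega
  · exact ple_refl _

theorem ple_lmax_right (x y : Int × Int) : ple y (lmax x y) := by
  obtain ⟨x1, x2⟩ := x
  obtain ⟨y1, y2⟩ := y
  simp only [lmax]
  split_ifs with h
  · exact ple_refl _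
  · rw [pyLexGt_iff] at h
    unfold ple
    simp only at *
    omega

theorem ple_total (x y : Int × Int) : ple x y ∨ ple y x := by
  unfold ple
  omega

theorem lmax_comm (x y : Int × Int) : lmax x y = lmax y x := by
  rcases ple_total x y with h | h
  · rw [lmax_eq_right h, lmax_eq_left h]
  · rw [lmax_eq_left h, lmax_eq_right h]

theorem ple_antisymm {x y : Int × Int} (h1 : ple x y) (h2 : ple y x) : x = y := by
  obtain ⟨x1, x2⟩ := x
  obtain ⟨y1, y2⟩ := y
  unfold ple at *
  simp only [Prod.mk.injEq]
  omega

theorem lmax_mem (x y : Int × Int) : lmax x y = x ∨ lmax x y = y := by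
  unfold lmax
  split_ifs <;> simp

theorem lmax_assoc (x y z : Int × Int) : lmax (lmax x y) z = lmax x (lmax y z) := by
  have hxL : ple x (lmax (lmax x y) z) := ple_trans (ple_lmax_left x y) (ple_lmax_left _ z)
  have hyL : ple y (lmax (lmax x y) z) := ple_trans (ple_lmax_right x y) (ple_lmax_left _ z)
  have hzL : ple z (lmax (lmax x y) z) := ple_lmax_right _ z
  have hxR : ple x (lmax x (lmax y z)) := ple_lmax_left x _
  have hyR : ple y (lmax x (lmax y z)) := ple_trans (ple_lmax_left y z) (ple_lmax_right x _)
  have hzR : ple z (lmax x (lmax y z)) := ple_trans (ple_lmax_right y z) (ple_lmax_right x _)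
  apply ple_antisymm
  · rcases lmax_mem (lmax x y) z with h | h
    · rcases lmax_mem x y with h' | h' <;> rw [h, h']
      · exact hxR
      · exact hyR
    · rw [h]; exact hzR
  · rcases lmax_mem x (lmax y z) with h | h
    · rw [h]; exact hxL
    · rcases lmax_mem y z with h' | h' <;> rw [h, h']
      · exact hyL
      · exact hzL

theorem lmax_idem (x : Int × Int) : lmax x x = x := lmax_eq_right (ple_refl x)

theorem lmax_lmax_self (a v : Int × Int) : lmax (lmax a v) v = lmax a v := by
  rw [lmax_assoc, lmax_idem]

-- folds of lmax: initial segments can be pulled out, and every contributor is ≤ the fold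
theorem foldl_lmax_pull {γ : Type} (l : List γ) (f : γ → Int × Int) (a : Int × Int) :
    ∀ x, l.foldl (fun acc e => lmax acc (f e)) (lmax a x) =
      lmax a (l.foldl (fun acc e => lmax acc (f e)) x) := by
  induction l with
  | nil => intro x; simp
  | cons e t ih =>
      intro x
      simp only [List.foldl_cons]
      rw [lmax_assoc]
      exact ih (lmax x (f e))

theorem ple_foldl_lmax_init {γ : Type} (l : List γ) (f : γ → Int × Int) :
    ∀ x, ple x (l.foldl (fun acc e => lmax acc (f e)) x) := by
  induction l with
  | nil => intro x; exact ple_refl x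
  | cons e t ih =>
      intro x
      simp only [List.foldl_cons]
      exact ple_trans (ple_lmax_left x (f e)) (ih _)

theorem ple_foldl_lmax_mem {γ : Type} {l : List γ} (f : γ → Int × Int) {e : γ} (he : e ∈ l) :
    ∀ x, ple (f e) (l.foldl (fun acc x => lmax acc (f x)) x) := by
  induction l with
  | nil => cases he
  | cons c t ih =>
      intro x
      simp only [List.foldl_cons]
      rcases List.mem_cons.mp he with rfl | hm
      · exact ple_trans (ple_lmax_right x (f e)) (ple_foldl_lmax_init t f _)
      · exact ih hm _

theorem foldl_flatMap {γ δ : Type} (g : γ → List δ) (F : (Int × Int) → δ → (Int × Int)) :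
    ∀ (l : List γ) (a : Int × Int),
      (l.flatMap g).foldl F a = l.foldl (fun a x => (g x).foldl F a) a := by
  intro l
  induction l with
  | nil => intro a; simp
  | cons x t ih => intro a; simp [List.foldl_append, ih]

-- two chunked folds over equally long lists agree if they agree chunkwise
theorem foldl_chunks_congr {γ δ : Type} :
    ∀ (xs : List γ) (ys : List δ) (FA : (Int × Int) → γ → (Int × Int))
      (FB : (Int × Int) → δ → (Int × Int)) (hlen : xs.length = ys.length),
      (∀ (j : Nat) (hj : j < xs.length) (a : Int × Int),
        FA a (xs[j]) = FB a (ys[j]'(hlen ▸ hj))) →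
      ∀ a, xs.foldl FA a = ys.foldl FB a := by
  intro xs
  induction xs with
  | nil =>
      intro ys FA FB hlen _ a
      rw [List.length_nil] at hlen
      rw [(List.length_eq_zero_iff).mp hlen.symm]
      simp
  | cons x t ih =>
      intro ys FA FB hlen h a
      match ys with
      | [] => simp at hlen
      | y :: ys' =>
          have h0 := h 0 (by simp) a
          simp only [List.getElem_cons_zero] at h0
          simp only [List.foldl_cons, h0]
          refine ih ys' FA FB (by simpa using hlen) (fun j hj b => ?_) _
          have := h (j + 1) (by simpa using Nat.succ_lt_succ hj) b
          simpa using this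

-- ----- the common recursive 'best over the subtree' functions -----

theorem mem_pushesA {parts : List (Int × Int)} {b : Int} {av : PySem.Set Int} {s : Int}
    {c : Int × PySem.Set Int × Int} (hc : c ∈ pushesA parts b av s) :
    ∃ i ∈ av, c.2.1 = PySem.Set.diff av [i] := by
  unfold pushesA at hc
  rw [PySem.List.foldl_append_eq_flatMap] at hc
  simp only [List.nil_append, List.mem_flatMap] at hc
  obtain ⟨i, hi, hstep⟩ := hc
  refine ⟨i, hi, ?_⟩
  rw [stepA_eq] at hstep
  rcases List.mem_append.mp hstep with h | h <;>
    (split_ifs at h <;> simp_all)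

theorem mem_pushesA_length {parts : List (Int × Int)} {b : Int} {av : PySem.Set Int} {s : Int}
    {c : Int × PySem.Set Int × Int} (hc : c ∈ pushesA parts b av s) :
    c.2.1.length < av.length := by
  obtain ⟨i, hi, hd⟩ := mem_pushesA hc
  rw [hd]
  exact diff_length_lt hi

-- value of one stack entry: the lexicographically best (length, strength) in its subtree
def bestOf (parts : List (Int × Int)) (e : Int × PySem.Set Int × Int) : Int × Int :=
  (pushesA parts e.1 e.2.1 e.2.2).attach.foldl (fun acc c => lmax acc (bestOf parts c.1))
    ((parts.length : Int) - (e.2.1.length : Int), e.2.2)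
termination_by e.2.1.length
decreasing_by exact mem_pushesA_length c.2

theorem bestOf_eq (parts : List (Int × Int)) (e : Int × PySem.Set Int × Int) :
    bestOf parts e = (pushesA parts e.1 e.2.1 e.2.2).foldl (fun acc c => lmax acc (bestOf parts c))
      ((parts.length : Int) - (e.2.1.length : Int), e.2.2) := by
  rw [bestOf]
  exact List.foldl_attach (f := fun acc c => lmax acc (bestOf parts c)) ..

-- B-side children of one backtracking state, position by position
def posChildren (port : Int) (rem : List (Int × Int)) (len s : Int) (j : Nat) :
    List (Int × List (Int × Int) × Int × Int) :=
  if hj : j < rem.length then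
    (if (rem[j]).1 = port then
      [((rem[j]).2, rem.take j ++ rem.drop (j + 1), len + 1, s + (rem[j]).1 + (rem[j]).2)]
     else []) ++
    (if (rem[j]).2 = port ∧ (rem[j]).1 ≠ (rem[j]).2 then
      [((rem[j]).1, rem.take j ++ rem.drop (j + 1), len + 1, s + (rem[j]).1 + (rem[j]).2)]
     else [])
  else []

def childrenB (port : Int) (rem : List (Int × Int)) (len s : Int) :
    List (Int × List (Int × Int) × Int × Int) :=
  (List.range rem.length).flatMap (posChildren port rem len s)

theorem mem_posChildren {port : Int} {rem : List (Int × Int)} {len s : Int} {j : Nat}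
    {c : Int × List (Int × Int) × Int × Int} (hc : c ∈ posChildren port rem len s j) :
    j < rem.length ∧ c.2.1 = rem.take j ++ rem.drop (j + 1) := by
  unfold posChildren at hc
  by_cases hj : j < rem.length
  · rw [dif_pos hj] at hc
    refine ⟨hj, ?_⟩
    rcases List.mem_append.mp hc with h | h <;> (split_ifs at h <;> simp_all)
  · rw [dif_neg hj] at hc
    cases hc

theorem mem_childrenB_length {port : Int} {rem : List (Int × Int)} {len s : Int}
    {c : Int × List (Int × Int) × Int × Int} (hc : c ∈ childrenB port rem len s) :
    c.2.1.length < rem.length := by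
  unfold childrenB at hc
  obtain ⟨j, _, hpc⟩ := List.mem_flatMap.mp hc
  obtain ⟨hj, hrem⟩ := mem_posChildren hpc
  rw [hrem]
  simp [List.length_take, List.length_drop]
  omega

def bestB (st : Int × List (Int × Int) × Int × Int) : Int × Int :=
  (childrenB st.1 st.2.1 st.2.2.1 st.2.2.2).attach.foldl (fun acc c => lmax acc (bestB c.1))
    (st.2.2.1, st.2.2.2)
termination_by st.2.1.length
decreasing_by exact mem_childrenB_length c.2

theorem bestB_eq (st : Int × List (Int × Int) × Int × Int) :
    bestB st = (childrenB st.1 st.2.1 st.2.2.1 st.2.2.2).foldl (fun acc c => lmax acc (bestB c))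
      (st.2.2.1, st.2.2.2) := by
  rw [bestB]
  exact List.foldl_attach (f := fun acc c => lmax acc (bestB c)) ..

-- ----- the while loop computes the lmax-fold of bestOf over the stack -----

theorem whileA_nil (parts : List (Int × Int)) (best : Int × Int) :
    whileA parts [] best = best := by
  rw [whileA]
  simp

theorem whileA_concat (parts : List (Int × Int)) (ys : List (Int × PySem.Set Int × Int))
    (e : Int × PySem.Set Int × Int) (best : Int × Int) :
    whileA parts (ys ++ [e]) best =
      whileA parts (ys ++ pushesA parts e.1 e.2.1 e.2.2)
        (lmax best ((parts.length : Int) - (e.2.1.length : Int), e.2.2)) := by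
  conv_lhs => rw [whileA]
  split
  · rename_i hnone
    rw [List.getLast?_concat] at hnone
    cases hnone
  · rename_i e' hsome
    rw [List.getLast?_concat] at hsome
    have he : e = e' := by injection hsome
    subst he
    rw [List.dropLast_concat]

theorem whileA_eq (parts : List (Int × Int)) :
    ∀ (N : Nat) (stack : List (Int × PySem.Set Int × Int)) (best : Int × Int),
      wsum stack ≤ N →
      whileA parts stack best =
        stack.foldl (fun acc e => lmax acc (bestOf parts e)) best := by
  intro N
  induction N using Nat.strong_induction_on with
  | _ N ih =>
      intro stack best hN
      cases hls : stack.getLast? with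
      | none =>
          have hnil : stack = [] := by
            cases stack with
            | nil => rfl
            | cons x t => simp at hls
          subst hnil
          rw [whileA_nil]
          rfl
      | some e =>
          obtain ⟨ys, rfl⟩ := List.getLast?_eq_some_iff.mp hls
          rw [whileA_concat]
          have hwlt : wsum (ys ++ pushesA parts e.1 e.2.1 e.2.2) < wsum (ys ++ [e]) := by
            rw [wsum_append, wsum_append]
            have h1 := wsum_pushesA_lt parts e.1 e.2.1 e.2.2
            have h2 : wsum [e] = wgt e.2.1.length := by simp [wsum]
            omega
          have hrec := ih (wsum (ys ++ pushesA parts e.1 e.2.1 e.2.2)) (by omega)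
            (ys ++ pushesA parts e.1 e.2.1 e.2.2)
            (lmax best ((parts.length : Int) - (e.2.1.length : Int), e.2.2)) (le_refl _)
          rw [hrec]
          rw [List.foldl_append, List.foldl_append]
          rw [lmax_comm best, foldl_lmax_pull]
          rw [lmax_comm ((parts.length : Int) - (e.2.1.length : Int), e.2.2), foldl_lmax_pull]
          rw [← bestOf_eq]
          simp

-- ----- bLoop computes the lmax-fold of bestB over the children from position i on -----

theorem bestB_eq' (port : Int) (rem : List (Int × Int)) (len s : Int) :
    bestB (port, rem, len, s) =
      (childrenB port rem len s).foldl (fun acc c => lmax acc (bestB c)) (len, s) :=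
  bestB_eq (port, rem, len, s)

theorem bLoop_stop (port : Int) (rem : List (Int × Int)) (len s : Int) (best : Int × Int)
    (i : Nat) (h : ¬ i < rem.length) : bLoop port rem len s best i = best := by
  rw [bLoop]
  rw [dif_neg h]

theorem bLoop_step (port : Int) (rem : List (Int × Int)) (len s : Int) (best : Int × Int)
    (i : Nat) (h : i < rem.length) :
    bLoop port rem len s best i =
      bLoop port rem len s
        (if (rem[i]).2 = port ∧ (rem[i]).1 ≠ (rem[i]).2 then
           bLoop (rem[i]).1 (rem.take i ++ rem.drop (i + 1)) (len + 1)
             (s + (rem[i]).1 + (rem[i]).2)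
             (lmax (if (rem[i]).1 = port then
                 bLoop (rem[i]).2 (rem.take i ++ rem.drop (i + 1)) (len + 1)
                   (s + (rem[i]).1 + (rem[i]).2)
                   (lmax best (len + 1, s + (rem[i]).1 + (rem[i]).2)) 0
               else best) (len + 1, s + (rem[i]).1 + (rem[i]).2)) 0
         else (if (rem[i]).1 = port then
             bLoop (rem[i]).2 (rem.take i ++ rem.drop (i + 1)) (len + 1)
               (s + (rem[i]).1 + (rem[i]).2)
               (lmax best (len + 1, s + (rem[i]).1 + (rem[i]).2)) 0
           else best))
        (i + 1) := by
  conv_lhs => rw [bLoop]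
  rw [dif_pos h]

theorem bLoop_eq :
    ∀ (M : Nat) (rem : List (Int × Int)), rem.length ≤ M →
    ∀ (k i : Nat), rem.length - i ≤ k →
    ∀ (port len s : Int) (best : Int × Int),
      bLoop port rem len s best i =
        ((List.range' i (rem.length - i)).flatMap (posChildren port rem len s)).foldl
          (fun acc c => lmax acc (bestB c)) best := by
  intro M
  induction M with
  | zero =>
      intro rem hrem k i _ port len s best
      have hL : rem.length = 0 := by omega
      rw [bLoop_stop _ _ _ _ _ _ (by omega), hL]
      simp
  | succ M ihM =>
      intro rem hrem k
      induction k with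
      | zero =>
          intro i hk port len s best
          rw [bLoop_stop _ _ _ _ _ _ (by omega)]
          have : rem.length - i = 0 := by omega
          rw [this]
          simp
      | succ k ihk =>
          intro i hk port len s best
          by_cases h : i < rem.length
          · rw [bLoop_step _ _ _ _ _ _ h]
            have hchild : ∀ (x : Int) (b0 : Int × Int),
                bLoop x (rem.take i ++ rem.drop (i + 1)) (len + 1)
                    (s + (rem[i]).1 + (rem[i]).2)
                    (lmax b0 (len + 1, s + (rem[i]).1 + (rem[i]).2)) 0 =
                  lmax b0 (bestB (x, rem.take i ++ rem.drop (i + 1), len + 1,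
                    s + (rem[i]).1 + (rem[i]).2)) := by
              intro x b0
              have hlen : (rem.take i ++ rem.drop (i + 1)).length = rem.length - 1 := by
                simp [List.length_take, List.length_drop]
                omega
              rw [ihM (rem.take i ++ rem.drop (i + 1)) (by omega)
                ((rem.take i ++ rem.drop (i + 1)).length) 0 (by omega)]
              rw [Nat.sub_zero, ← List.range_eq_range']
              rw [show (List.range (rem.take i ++ rem.drop (i + 1)).length).flatMap
                    (posChildren x (rem.take i ++ rem.drop (i + 1)) (len + 1)
                      (s + (rem[i]).1 + (rem[i]).2)) =
                  childrenB x (rem.take i ++ rem.drop (i + 1)) (len + 1)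
                    (s + (rem[i]).1 + (rem[i]).2) from rfl]
              rw [foldl_lmax_pull]
              rw [← bestB_eq' x (rem.take i ++ rem.drop (i + 1)) (len + 1)
                (s + (rem[i]).1 + (rem[i]).2)]
            rw [ihk (i + 1) (by omega)]
            have hsplit : rem.length - i = (rem.length - (i + 1)) + 1 := by omega
            rw [hsplit, List.range'_succ, List.flatMap_cons, List.foldl_append]
            congr 1
            unfold posChildren
            rw [dif_pos h]
            by_cases hc1 : (rem[i]).1 = port
            · have hc2 : ¬ ((rem[i]).2 = port ∧ (rem[i]).1 ≠ (rem[i]).2) := by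
                intro hc
                exact hc.2 (by rw [hc1, hc.1])
              rw [if_neg hc2, if_pos hc1, if_pos hc1, if_neg hc2]
              rw [hchild]
              simp
            · by_cases hc2 : (rem[i]).2 = port ∧ (rem[i]).1 ≠ (rem[i]).2
              · rw [if_pos hc2, if_neg hc1, if_neg hc1, if_pos hc2]
                rw [hchild]
                simp
              · rw [if_neg hc2, if_neg hc1, if_neg hc1, if_neg hc2]
                simp
          · rw [bLoop_stop _ _ _ _ _ _ h]
            have : rem.length - i = 0 := by omega
            rw [this]
            simp

theorem alt_eq_bestB (parts : List (Int × Int)) :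
    assemble_long_alt parts = (bestB (0, parts, 0, 0)).2 := by
  unfold assemble_long_alt
  rw [lmax_idem]
  rw [bLoop_eq parts.length parts (le_refl _) parts.length 0 (by omega)]
  rw [Nat.sub_zero, ← List.range_eq_range']
  rw [show (List.range parts.length).flatMap (posChildren 0 parts 0 0) =
      childrenB 0 parts 0 0 from rfl]
  rw [← bestB_eq' 0 parts 0 0]

-- ----- the two subtree-best functions agree: index sets vs remaining-part lists -----

theorem pushesA_eq_flatMap (parts : List (Int × Int)) (b : Int) (av : PySem.Set Int) (s : Int) :
    pushesA parts b av s = av.flatMap (stepA parts b av s) := by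
  unfold pushesA
  rw [PySem.List.foldl_append_eq_flatMap]
  simp

theorem bestOf_eq' (parts : List (Int × Int)) (port : Int) (av : PySem.Set Int) (s : Int) :
    bestOf parts (port, av, s) =
      (pushesA parts port av s).foldl (fun acc c => lmax acc (bestOf parts c))
        ((parts.length : Int) - (av.length : Int), s) :=
  bestOf_eq parts (port, av, s)

theorem diff_eq_take_drop (av : List Int) (j : Nat) (hj : j < av.length) (hnd : av.Nodup) :
    PySem.Set.diff av [av[j]] = av.take j ++ av.drop (j + 1) := by
  obtain ⟨x, hx⟩ : ∃ x, av[j] = x := ⟨_, rfl⟩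
  have hdecomp : av = av.take j ++ x :: av.drop (j + 1) := by
    conv_lhs => rw [← List.take_append_drop j av]
    congr 1
    rw [← hx]
    exact List.drop_eq_getElem_cons hj
  have hnd' := hnd
  rw [hdecomp] at hnd'
  have hnotin_take : ∀ y ∈ av.take j, ¬(y = x) := by
    intro y hy hEq
    have hdisj := (List.nodup_append.mp hnd').2.2
    exact hdisj y hy x (by simp) hEq
  have hnotin_drop : x ∉ av.drop (j + 1) := by
    have := (List.nodup_append.mp hnd').2.1
    exact (List.nodup_cons.mp this).1
  rw [hx]
  unfold PySem.Set.diff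
  conv_lhs => rw [hdecomp]
  rw [List.filter_append, List.filter_cons]
  have hpredj : (!PySem.Set.contains [x] x) = false := by
    simp [PySem.Set.contains]
  rw [hpredj]
  simp only [Bool.false_eq_true, if_neg (by simp : ¬False)]
  congr 1
  · apply List.filter_eq_self.mpr
    intro y hy
    simp [PySem.Set.contains]
    exact fun h => (hnotin_take y hy h).elim
  · apply List.filter_eq_self.mpr
    intro y hy
    simp [PySem.Set.contains]
    intro hEq
    exact hnotin_drop (hEq ▸ hy)

theorem take_drop_sublist (av : List Int) (j : Nat) (hj : j < av.length) :
    (av.take j ++ av.drop (j + 1)).Sublist av := by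
  conv_rhs => rw [← List.take_append_drop j av, List.drop_eq_getElem_cons hj]
  exact List.Sublist.append (List.Sublist.refl _) (List.sublist_cons_self _ _)

theorem bestOf_eq_bestB (parts : List (Int × Int)) :
    ∀ (K : Nat) (av : PySem.Set Int), av.length ≤ K → av.Nodup →
    ∀ (port s : Int),
      bestOf parts (port, av, s) =
        bestB (port, av.map (fun i => PySem.List.pyGetD parts i (0, 0)),
          (parts.length : Int) - (av.length : Int), s) := by
  intro K
  induction K with
  | zero =>
      intro av hK _ port s
      have hav : av = [] := List.length_eq_zero_iff.mp (by omega)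
      subst hav
      rw [bestOf_eq', bestB_eq']
      rw [pushesA_eq_flatMap]
      simp [childrenB]
  | succ K ih =>
      intro av hK hnd port s
      rw [bestOf_eq', bestB_eq']
      rw [pushesA_eq_flatMap, foldl_flatMap]
      unfold childrenB
      rw [foldl_flatMap]
      have hlen_rem : (av.map (fun i => PySem.List.pyGetD parts i (0, 0))).length = av.length :=
        List.length_map ..
      refine foldl_chunks_congr av
        (List.range (av.map (fun i => PySem.List.pyGetD parts i (0, 0))).length) _ _
        (by rw [List.length_range, hlen_rem]) ?_ _
      intro j hj a
      have hjr : (List.range (av.map (fun i => PySem.List.pyGetD parts i (0, 0))).length)[j]'(by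
          rw [List.length_range, hlen_rem]; exact hj) = j := List.getElem_range _
      rw [hjr]
      have hjrem : j < (av.map (fun i => PySem.List.pyGetD parts i (0, 0))).length := by
        rw [hlen_rem]; exact hj
      -- per-position: A's pushes for index av[j] vs B's children at position j
      rw [stepA_eq, diff_eq_take_drop av j hj hnd]
      unfold posChildren
      rw [dif_pos hjrem]
      have hremj : (av.map (fun i => PySem.List.pyGetD parts i (0, 0)))[j]'hjrem =
          PySem.List.pyGetD parts (av[j]) (0, 0) := List.getElem_map ..
      rw [hremj]
      -- map commutes with take/drop
      have hmap_td : (av.map (fun i => PySem.List.pyGetD parts i (0, 0))).take j ++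
            (av.map (fun i => PySem.List.pyGetD parts i (0, 0))).drop (j + 1) =
          (av.take j ++ av.drop (j + 1)).map (fun i => PySem.List.pyGetD parts i (0, 0)) := by
        rw [List.map_append, List.map_take, List.map_drop]
      rw [hmap_td]
      -- the child recursion: IH applies to the one-shorter index list
      have hchild_len : (av.take j ++ av.drop (j + 1)).length = av.length - 1 := by
        simp [List.length_take, List.length_drop]
        omega
      have hchild_nd : (av.take j ++ av.drop (j + 1)).Nodup :=
        (take_drop_sublist av j hj).nodup hnd
      have harith : (parts.length : Int) - ((av.take j ++ av.drop (j + 1)).length : Int) =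
          (parts.length : Int) - (av.length : Int) + 1 := by
        rw [hchild_len]
        have : 1 ≤ av.length := by omega
        push_cast [Nat.cast_sub this]
        ring
      have hchild : ∀ (x s' : Int),
          bestOf parts (x, av.take j ++ av.drop (j + 1), s') =
            bestB (x, (av.take j ++ av.drop (j + 1)).map (fun i => PySem.List.pyGetD parts i (0, 0)),
              (parts.length : Int) - (av.length : Int) + 1, s') := by
        intro x s'
        rw [ih (av.take j ++ av.drop (j + 1)) (by omega) hchild_nd x s']
        rw [harith]
      set p := PySem.List.pyGetD parts (av[j]) (0, 0) with hp
      by_cases hc1 : p.1 = port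
      · by_cases hc2 : p.2 = port
        · -- both orientations fire in A; B explores the (then equal) child once
          have hpp : p.1 = p.2 := by rw [hc1, hc2]
          have hc2' : ¬(p.2 = port ∧ p.1 ≠ p.2) := fun hc => hc.2 hpp
          rw [if_pos hc1, if_pos hc2, if_pos hc1, if_neg hc2']
          simp only [List.cons_append, List.nil_append, List.foldl_cons, List.foldl_nil]
          rw [hchild, hchild]
          have hs : s + p.2 + p.1 = s + p.1 + p.2 := by ring
          rw [hs, ← hpp]
          exact lmax_lmax_self _ _
        · have hc2' : ¬(p.2 = port ∧ p.1 ≠ p.2) := fun hc => hc2 hc.1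
          rw [if_pos hc1, if_neg hc2, if_pos hc1, if_neg hc2']
          simp only [List.append_nil, List.foldl_cons, List.foldl_nil]
          rw [hchild]
      · by_cases hc2 : p.2 = port
        · have hne : p.1 ≠ p.2 := by
            intro hEq
            exact hc1 (hEq ▸ hc2)
          rw [if_neg hc1, if_pos hc2, if_neg hc1, if_pos ⟨hc2, hne⟩]
          simp only [List.nil_append, List.foldl_cons, List.foldl_nil]
          rw [hchild]
          have hs : s + p.2 + p.1 = s + p.1 + p.2 := by ring
          rw [hs]
        · have hc2' : ¬(p.2 = port ∧ p.1 ≠ p.2) := fun hc => hc2 hc.1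
          rw [if_neg hc1, if_neg hc2, if_neg hc1, if_neg hc2']
          simp

-- ----- the seeding loop is exactly one expansion of a virtual root state -----

theorem seedsA_eq (parts : List (Int × Int)) :
    seedsA parts =
      pushesA parts 0 (PySem.List.pyRange 0 (parts.length : Int)) 0 := by
  have hofl : ∀ (q : Int → Bool),
      PySem.Set.ofList ((PySem.List.pyRange 0 (parts.length : Int)).filter q) =
        (PySem.List.pyRange 0 (parts.length : Int)).filter q := fun q =>
    PySem.Set.ofList_eq_self_of_nodup _ ((PySem.List.nodup_pyRange_one _ _).filter q)
  unfold seedsA pushesA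
  rw [PySem.List.enumerate_eq_map_pyRange parts ((0 : Int), (0 : Int))]
  rw [List.foldl_map]
  have hlen : PySem.List.len parts = (parts.length : Int) := PySem.List.len_eq parts
  rw [hlen]
  apply PySem.List.foldl_congr_mem
  intro acc j _
  rw [stepA_eq]
  have hav : PySem.Set.ofList
        ((PySem.List.pyRange 0 (parts.length : Int)).filter (fun x => decide (x ≠ j))) =
      PySem.Set.diff (PySem.List.pyRange 0 (parts.length : Int)) [j] := by
    rw [hofl]
    unfold PySem.Set.diff
    apply List.filter_congr
    intro x _
    simp [PySem.Set.contains]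
  set ab := PySem.List.pyGetD parts j ((0 : Int), (0 : Int)) with hab
  by_cases hc1 : ab.1 = 0
  · by_cases hc2 : ab.2 = 0
    · rw [if_pos (Or.inl hc1), if_pos hc1, if_pos hc2, if_pos hc1, if_pos hc2]
      rw [hav]
      have h1 : (0 : Int) + ab.1 + ab.2 = ab.2 := by rw [hc1]; ring
      have h2 : (0 : Int) + ab.2 + ab.1 = ab.1 := by rw [hc2]; ring
      rw [h1, h2]
      simp [← hab]
    · rw [if_pos (Or.inl hc1), if_pos hc1, if_neg hc2, if_pos hc1, if_neg hc2]
      rw [hav]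
      have h1 : (0 : Int) + ab.1 + ab.2 = ab.2 := by rw [hc1]; ring
      rw [h1]
      simp [← hab]
  · by_cases hc2 : ab.2 = 0
    · rw [if_pos (Or.inr hc2), if_neg hc1, if_pos hc2, if_neg hc1, if_pos hc2]
      rw [hav]
      have h2 : (0 : Int) + ab.2 + ab.1 = ab.1 := by rw [hc2]; ring
      rw [h2]
      simp [← hab]
    · rw [if_neg (by tauto), if_neg hc1, if_neg hc2]
      simp

theorem rootSet_length (parts : List (Int × Int)) :
    (PySem.List.pyRange 0 (parts.length : Int)).length = parts.length := by
  rw [PySem.List.length_pyRange_one]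
  omega

theorem seed_av_length (parts : List (Int × Int)) {e : Int × PySem.Set Int × Int}
    (he : e ∈ seedsA parts) : e.2.1.length = parts.length - 1 := by
  rw [seedsA_eq] at he
  obtain ⟨i, hi, hd⟩ := mem_pushesA (by rw [pushesA_eq_flatMap] at he ⊢; exact he)
  obtain ⟨j, hj, hji⟩ := List.mem_iff_getElem.mp hi
  rw [hd, ← hji, diff_eq_take_drop _ j hj (PySem.List.nodup_pyRange_one _ _)]
  rw [rootSet_length parts] at hj
  simp [List.length_take, List.length_drop]
  omega

-- ===== VERDICT (by name: the statement is the Claim_ definition above) =====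
theorem assemble_long_spec : Claim_equal_assemble_long := by
  unfold Claim_equal_assemble_long
  intro parts _ hpre
  unfold Spec_assemble_long
  rw [alt_eq_bestB]
  -- Pre_ gives a zero-ended part, hence a nonempty seed stack
  have hex : ∃ k, ∃ hk : k < parts.length, (parts[k]).1 = 0 ∨ (parts[k]).2 = 0 := by
    unfold Pre_assemble_long at hpre
    rw [List.any_eq_true] at hpre
    obtain ⟨p, hp, hcond⟩ := hpre
    obtain ⟨k, hk, hpk⟩ := List.mem_iff_getElem.mp hp
    refine ⟨k, hk, ?_⟩
    rw [hpk]
    simpa using hcond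
  obtain ⟨k, hk, hzero⟩ := hex
  have hjR : ((k : Int)) ∈ PySem.List.pyRange 0 (parts.length : Int) := by
    rw [PySem.List.mem_pyRange_one]
    omega
  have hgetk : PySem.List.pyGetD parts (k : Int) ((0 : Int), (0 : Int)) = parts[k] := by
    simp [PySem.List.pyGetD]
    rw [List.getElem?_eq_getElem hk]
    rfl
  have hstep_ne : stepA parts 0 (PySem.List.pyRange 0 (parts.length : Int)) 0 (k : Int) ≠ [] := by
    rw [stepA_eq, hgetk]
    rcases hzero with h0 | h0
    · simp [h0]
    · by_cases h1 : (parts[k]).1 = 0 <;> simp [h0, h1]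
  have hne : seedsA parts ≠ [] := by
    rw [seedsA_eq, pushesA_eq_flatMap]
    intro hnil
    obtain ⟨c, hc⟩ := List.exists_mem_of_ne_nil _ hstep_ne
    have hmem : c ∈ (PySem.List.pyRange 0 (parts.length : Int)).flatMap
        (stepA parts 0 (PySem.List.pyRange 0 (parts.length : Int)) 0) :=
      List.mem_flatMap.mpr ⟨_, hjR, hc⟩
    rw [hnil] at hmem
    cases hmem
  simp only [assemble_long]
  cases hmx : PySem.List.max? ((seedsA parts).map fun e => e.2.2) (fun x => x) with
  | none =>
      exact absurd ((PySem.List.max?_eq_none_iff _ _).mp hmx) (by simpa using hne)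
  | some m =>
      show (whileA parts (seedsA parts) (1, m)).2 = (bestB (0, parts, 0, 0)).2
      rw [whileA_eq parts (wsum (seedsA parts)) (seedsA parts) (1, m) (le_refl _)]
      have hmmem : m ∈ (seedsA parts).map (fun e => e.2.2) := PySem.List.max?_mem hmx
      obtain ⟨e0, he0, he0s⟩ := List.mem_map.mp hmmem
      have hn1 : 1 ≤ parts.length := by omega
      have he0len : e0.2.1.length = parts.length - 1 := seed_av_length parts he0
      have hnode : ((parts.length : Int) - (e0.2.1.length : Int), e0.2.2) = ((1 : Int), m) := by
        have h1 : (parts.length : Int) - ((parts.length - 1 : Nat) : Int) = 1 := by omega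
        rw [he0len, he0s, h1]
      have hple1 : ple ((1 : Int), m) (bestOf parts e0) := by
        rw [bestOf_eq parts e0, ← hnode]
        exact ple_foldl_lmax_init _ _ _
      have hple2 : ple (bestOf parts e0)
          ((seedsA parts).foldl (fun acc e => lmax acc (bestOf parts e)) ((0 : Int), (0 : Int))) :=
        ple_foldl_lmax_mem _ he0 _
      have hple := ple_trans hple1 hple2
      have h10 : lmax ((1 : Int), m) ((0 : Int), (0 : Int)) = ((1 : Int), m) :=
        lmax_eq_left (Or.inl (by norm_num))
      have hfold : (seedsA parts).foldl (fun acc e => lmax acc (bestOf parts e)) (1, m) =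
          (seedsA parts).foldl (fun acc e => lmax acc (bestOf parts e)) ((0 : Int), (0 : Int)) := by
        conv_lhs => rw [← h10]
        rw [foldl_lmax_pull]
        exact lmax_eq_right hple
      rw [hfold]
      have hroot : (seedsA parts).foldl (fun acc e => lmax acc (bestOf parts e))
            ((0 : Int), (0 : Int)) =
          bestOf parts (0, PySem.List.pyRange 0 (parts.length : Int), 0) := by
        rw [bestOf_eq']
        rw [← seedsA_eq]
        congr 1
        rw [rootSet_length]
        simp
      rw [hroot]
      rw [bestOf_eq_bestB parts (PySem.List.pyRange 0 (parts.length : Int)).length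
        (PySem.List.pyRange 0 (parts.length : Int)) (le_refl _)
        (PySem.List.nodup_pyRange_one _ _) 0 0]
      have hmap : (PySem.List.pyRange 0 (parts.length : Int)).map
          (fun i => PySem.List.pyGetD parts i (0, 0)) = parts := by
        have h := PySem.List.map_pyGetD_pyRange_zero parts ((0 : Int), (0 : Int))
        rw [PySem.List.len_eq] at h
        exact h
      have hlen0 : (parts.length : Int) -
          ((PySem.List.pyRange 0 (parts.length : Int)).length : Int) = 0 := by
        rw [rootSet_length]
        simp
      rw [hmap, hlen0]
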